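-- pv_equiv track=rewrite | github.com/pypi-data/pypi-mirror-346 | packages/construct-tracker/construct_tracker-1.0.16.tar.gz/construct_tracker-1.0.16/src/construct_tracker/utils/context.py | get_docs_matching_token
-- ===== SOURCE A (Python) =====
-- from typing import List, Optional, Tuple
--
-- def get_context(doc: str, token: str, n_words_pre: int = 10, n_words_post: int = 10) -> str:
--     """
--     Extracts a window of text around a given token within a document.
--
--     Args:
--         doc (str): The document from which to extract the context.
--         token (str): The token around which to extract the context.
--         n_words_pre (int, optional): The number of words to include before the token. Defaults to 10.
--         n_words_post (int, optional): The number of words to include after the token. Defaults to 10.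
--
--     Returns:
--         str: A string containing the specified number of words before and after the token.
--
--     Example:
--         >>> get_context("This is a test document for extracting context.", "test", 2, 3)
--         'is a test document for extracting'
--     """
--     doc_pre_token = " ".join(doc.split(token)[0].split(" ")[-n_words_pre:])
--     doc_post_token = " ".join(doc.split(token)[1].split(" ")[:n_words_post])
--     doc_windowed = doc_pre_token + token + doc_post_token
--     return doc_windowed
--
-- def get_docs_matching_token(
--     docs: List[str], token: str, window: Optional[Tuple[int, int]] = (10, 10), exact_match_n: int = 4
-- ) -> List[str]:
--     """
--     Filters a list of documents to those that contain a specific token, with options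
--     for exact matching and extracting context windows around the token.
--
--     Args:
--         docs (List[str]): A list of documents to search.
--         token (str): The token to search for within the documents.
--         window (Optional[Tuple[int, int]], optional): A tuple specifying the number of words before and after
--                                                      the token to include in the context. Defaults to (10, 10).
--         exact_match_n (int, optional): If the token length is less than or equal to this number,
--                                        only exact matches (whole words) will be considered. Defaults to 4.
--
--     Returns:
--         List[str]: A list of documents or document snippets that match the token criteria.
--
--     Example:
--         >>> get_docs_matching_token(['get paranoid and I think this is also a'], 'thin', window=(10,10), exact_match_n=4)
--         ['get paranoid and I think this is also a']
--     """
--     docs_matching_token = [n for n in docs if token in n]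
--
--     if len(token) <= exact_match_n:
--         # Exact match
--         docs_matching_token2 = docs_matching_token.copy()
--         docs_matching_token = []
--         for doc in docs_matching_token2:
--             words = doc.split(" ")
--             if token in words:
--                 docs_matching_token.append(doc)
--
--     if window:
--         docs_matching_token_windowed = []
--         for doc in docs_matching_token:
--             doc_windowed = get_context(doc, token, n_words_pre=window[0], n_words_post=window[1])
--             docs_matching_token_windowed.append(doc_windowed)
--         return docs_matching_token_windowed
--     else:
--         return docs_matching_token
-- ===== SOURCE B (Python) =====
-- from typing import List, Optional, Tuple
--
-- def get_context(doc: str, token: str, n_words_pre: int = 10, n_words_post: int = 10) -> str: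
--     doc_pre_token = " ".join(doc.split(token)[0].split(" ")[-n_words_pre:])
--     doc_post_token = " ".join(doc.split(token)[1].split(" ")[:n_words_post])
--     return doc_pre_token + token + doc_post_token
--
-- def get_docs_matching_token(
--     docs: List[str], token: str, window: Optional[Tuple[int, int]] = (10, 10), exact_match_n: int = 4
-- ) -> List[str]:
--     # Single pass: each document is tested and (optionally) windowed once.
--     out = []
--     for doc in docs:
--         if token not in doc:
--             continue
--         if len(token) <= exact_match_n and token not in doc.split(" "):
--             continue
--         out.append(get_context(doc, token, window[0], window[1]) if window else doc)
--     return out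
-- ===== Notes on version B (the rewrite author's own statement) =====
-- stated objective: simpler
-- what changed: Replaces A's three sequential passes (substring-filter comprehension, copy-then-refilter exact-match loop, separate windowing loop over the intermediate list) with one loop over docs that decides and windows each document in place, building the result directly.
import Mathlib
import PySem

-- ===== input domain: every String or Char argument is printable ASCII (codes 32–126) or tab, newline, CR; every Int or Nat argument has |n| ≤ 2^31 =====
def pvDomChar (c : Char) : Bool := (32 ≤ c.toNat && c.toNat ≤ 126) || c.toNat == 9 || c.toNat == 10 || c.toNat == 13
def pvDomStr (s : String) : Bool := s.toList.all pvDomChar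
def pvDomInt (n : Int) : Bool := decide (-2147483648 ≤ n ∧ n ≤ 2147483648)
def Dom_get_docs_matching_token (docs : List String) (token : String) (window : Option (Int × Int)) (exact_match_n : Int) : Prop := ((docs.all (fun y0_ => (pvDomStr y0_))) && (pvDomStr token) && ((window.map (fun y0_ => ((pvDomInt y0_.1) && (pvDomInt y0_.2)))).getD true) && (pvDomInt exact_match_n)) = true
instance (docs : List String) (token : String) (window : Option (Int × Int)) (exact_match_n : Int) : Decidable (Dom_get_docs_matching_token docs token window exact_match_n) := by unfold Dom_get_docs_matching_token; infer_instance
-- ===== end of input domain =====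

-- B replaces A's three sequential passes by one fused loop over docs (same cost, simpler); get_context is shared verbatim.

-- ===== PORT A =====
-- shared helper: get_context, transliterated verbatim (used by both ports; token = "" would be a ValueError in Python and is excluded by Pre_)
def get_context (doc : String) (token : String) (n_words_pre : Int) (n_words_post : Int) : String :=
  let parts := (PySem.Str.split? doc token).getD []
  let doc_pre_token := PySem.Str.join " " (PySem.List.slice ((PySem.Str.split? ((PySem.List.pyGet? parts 0).getD "") " ").getD []) (some (-n_words_pre)) none)
  let doc_post_token := PySem.Str.join " " (PySem.List.slice ((PySem.Str.split? ((PySem.List.pyGet? parts 1).getD "") " ").getD []) none (some n_words_post))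
  doc_pre_token ++ token ++ doc_post_token

def get_docs_matching_token (docs : List String) (token : String) (window : Option (Int × Int)) (exact_match_n : Int) : List String :=
  let docs_matching_token := docs.filter (fun n_ => PySem.Str.isIn token n_)
  let docs_matching_token2 :=
    if PySem.Str.len token ≤ exact_match_n then
      -- exact match: copy, reset, refill
      docs_matching_token.foldl (fun acc doc =>
        let words := (PySem.Str.split? doc " ").getD []
        if token ∈ words then acc ++ [doc] else acc) []
    else docs_matching_token
  match window with
  | some w => docs_matching_token2.foldl (fun acc doc => acc ++ [get_context doc token w.1 w.2]) []
  | none => docs_matching_token2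

-- ===== PORT B =====
def get_docs_matching_token_alt (docs : List String) (token : String) (window : Option (Int × Int)) (exact_match_n : Int) : List String :=
  match docs with
  | [] => []
  | doc :: rest =>
    let rest_out := get_docs_matching_token_alt rest token window exact_match_n
    if PySem.Str.isIn token doc then
      if PySem.Str.len token ≤ exact_match_n ∧ token ∉ (PySem.Str.split? doc " ").getD [] then
        rest_out
      else
        (match window with
         | some w => get_context doc token w.1 w.2
         | none => doc) :: rest_out
    else rest_out

-- ===== PRECONDITION & SPEC =====
-- Pre_ excludes exactly the inputs on which Python A raises ValueError: an empty token together with a window and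
-- at least one document that survives the filters (every document if the exact-match step is skipped, i.e.
-- exact_match_n < 0; otherwise one with an empty space-separated chunk), since doc.split("") then raises; both
-- A and B raise there, and everywhere else both return.
def Pre_get_docs_matching_token (docs : List String) (token : String) (window : Option (Int × Int)) (exact_match_n : Int) : Prop :=
  ¬ (token = "" ∧ window.isSome ∧
      ((exact_match_n < 0 ∧ docs ≠ []) ∨
       (0 ≤ exact_match_n ∧ ∃ d ∈ docs, "" ∈ (PySem.Str.split? d " ").getD [])))
instance (docs : List String) (token : String) (window : Option (Int × Int)) (exact_match_n : Int) : Decidable (Pre_get_docs_matching_token docs token window exact_match_n) := by unfold Pre_get_docs_matching_token; infer_instance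
def pvWitness_get_docs_matching_token : List String × String × (Option (Int × Int)) × Int := (["get paranoid and I think this is also a"], "thin", some (2, 2), 4)

def Spec_get_docs_matching_token (docs : List String) (token : String) (window : Option (Int × Int)) (exact_match_n : Int) (out : List String) : Prop := out = get_docs_matching_token_alt docs token window exact_match_n
instance (docs : List String) (token : String) (window : Option (Int × Int)) (exact_match_n : Int) (out : List String) : Decidable (Spec_get_docs_matching_token docs token window exact_match_n out) := by unfold Spec_get_docs_matching_token; infer_instance

-- ===== CLAIM (what is proved, stated in full; the proofs are below) =====
def Claim_equal_get_docs_matching_token : Prop := ∀ (docs : List String) (token : String) (window : Option (Int × Int)) (exact_match_n : Int), Dom_get_docs_matching_token docs token window exact_match_n → Pre_get_docs_matching_token docs token window exact_match_n → Spec_get_docs_matching_token docs token window exact_match_n (get_docs_matching_token docs token window exact_match_n)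

-- ===== LEMMAS AND PROOFS =====

-- the fused per-document predicate B applies, as a Bool
def pvKeep (token : String) (exact_match_n : Int) (d : String) : Bool :=
  PySem.Str.isIn token d &&
    (!(decide (PySem.Str.len token ≤ exact_match_n)) || decide (token ∈ (PySem.Str.split? d " ").getD []))

-- the final mapping step (windowing or identity)
def pvFinish (token : String) (window : Option (Int × Int)) (l : List String) : List String :=
  match window with
  | some w => l.map (fun d => get_context d token w.1 w.2)
  | none => l

lemma pvFinish_cons (token : String) (window : Option (Int × Int)) (d : String) (l : List String) :
    pvFinish token window (d :: l) =
      (match window with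
       | some w => get_context d token w.1 w.2
       | none => d) :: pvFinish token window l := by
  cases window <;> simp [pvFinish]

lemma A_norm (docs : List String) (token : String) (window : Option (Int × Int)) (exact_match_n : Int) :
    get_docs_matching_token docs token window exact_match_n =
      pvFinish token window (docs.filter (pvKeep token exact_match_n)) := by
  unfold get_docs_matching_token
  dsimp only
  have hfilt : ∀ l : List String,
      l.foldl (fun acc doc =>
        if token ∈ (PySem.Str.split? doc " ").getD [] then acc ++ [doc] else acc) [] =
      l.filter (fun d => decide (token ∈ (PySem.Str.split? d " ").getD [])) := by
    intro l
    have := PySem.List.foldl_append_if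
      (fun d => decide (token ∈ (PySem.Str.split? d " ").getD ([] : List String)))
      (fun d => d) l []
    simpa using this
  have hsel : (if PySem.Str.len token ≤ exact_match_n then
        (docs.filter (fun n_ => PySem.Str.isIn token n_)).foldl (fun acc doc =>
          if token ∈ (PySem.Str.split? doc " ").getD [] then acc ++ [doc] else acc) []
      else docs.filter (fun n_ => PySem.Str.isIn token n_)) =
      docs.filter (pvKeep token exact_match_n) := by
    by_cases h : PySem.Str.len token ≤ exact_match_n
    · have h' : (token.length : Int) ≤ exact_match_n := by simpa using h
      rw [if_pos h, hfilt, List.filter_filter]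
      exact List.filter_congr (fun a _ => by simp [pvKeep, h', Bool.and_comm])
    · have h' : ¬ (token.length : Int) ≤ exact_match_n := by simpa using h
      rw [if_neg h]
      exact List.filter_congr (fun a _ => by simp [pvKeep, h'])
  rw [hsel]
  cases window with
  | none => rfl
  | some w =>
    dsimp only [pvFinish]
    rw [PySem.List.foldl_append_singleton_eq_map, List.nil_append]

lemma B_norm (docs : List String) (token : String) (window : Option (Int × Int)) (exact_match_n : Int) :
    get_docs_matching_token_alt docs token window exact_match_n =
      pvFinish token window (docs.filter (pvKeep token exact_match_n)) := by
  induction docs with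
  | nil => cases window <;> simp [get_docs_matching_token_alt, pvFinish]
  | cons doc rest ih =>
    simp only [get_docs_matching_token_alt]
    by_cases hin : PySem.Str.isIn token doc
    · have hin' : PySem.Chars.isIn token.toList doc.toList = true := by simpa using hin
      by_cases hskip : PySem.Str.len token ≤ exact_match_n ∧ token ∉ (PySem.Str.split? doc " ").getD []
      · have h1' : (token.length : Int) ≤ exact_match_n := by simpa using hskip.1
        have hsk' : (token.length : Int) ≤ exact_match_n ∧ token ∉ (PySem.Str.split? doc " ").getD [] :=
          ⟨h1', hskip.2⟩
        have hk : pvKeep token exact_match_n doc = false := by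
          simp [pvKeep, hin', h1', hskip.2]
        simp [hin', hsk', ih, hk]
      · have hsk' : ¬ ((token.length : Int) ≤ exact_match_n ∧ token ∉ (PySem.Str.split? doc " ").getD []) := by
          simpa using hskip
        have hk : pvKeep token exact_match_n doc = true := by
          by_cases h1 : (token.length : Int) ≤ exact_match_n
          · have h2 : token ∈ (PySem.Str.split? doc " ").getD [] := by
              by_contra h2; exact hsk' ⟨h1, h2⟩
            simp [pvKeep, hin', h1, h2]
          · simp [pvKeep, hin', h1]
        simp [hin', hsk', ih, hk, pvFinish_cons]
    · have hinf : PySem.Chars.isIn token.toList doc.toList = false := by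
        simpa using hin
      have hk : pvKeep token exact_match_n doc = false := by simp [pvKeep, hinf]
      simp [hinf, ih, hk]

-- ===== VERDICT (by name: the statement is the Claim_ definition above) =====
theorem get_docs_matching_token_spec : Claim_equal_get_docs_matching_token := by
  intro docs token window exact_match_n _ _
  unfold Spec_get_docs_matching_token
  rw [A_norm, B_norm]
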